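-- pv_equiv track=rewrite | github.com/NinaPant/assignment-2016-4 | dna_store.py | encodeDnaHuffman
-- ===== SOURCE A (Python) =====
-- def encodeDnaHuffman(code):
--     last = 'A'
--     dna = []
--     for element in code:
--         # print (element)
--         new = singleElementDna(last,element)
--         dna.append(new)
--         last = new
--     return dna
--
-- def singleElementDna(last,element):
--     if last == 'A':
--         if int(element) == 0:
--             return 'C'
--         if int(element) == 1:
--             return 'G'
--         else:
--             return 'T'
--     if last == 'C':
--         if int(element) == 0:
--             return 'G'
--         if int(element) == 1:
--             return 'T'
--         else:
--             return 'A'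
--     if last == 'G':
--         if int(element) == 0:
--             return 'T'
--         if int(element) == 1:
--             return 'A'
--         else:
--             return 'C'
--     if last == 'T':
--         if int(element) == 0:
--             return 'A'
--         if int(element) == 1:
--             return 'C'
--         else:
--             return 'G'
-- ===== SOURCE B (Python) =====
-- def encodeDnaHuffman(code):
--     # staged passes: element -> step size, cumulative sums, then index 'ACGT'
--     steps = [1 if int(e) == 0 else 2 if int(e) == 1 else 3 for e in code]
--     sums = []
--     total = 0
--     for s in steps:
--         total += s
--         sums.append(total)
--     return ['ACGT'[t % 4] for t in sums]
-- ===== Notes on version B (the rewrite author's own statement) =====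
-- stated objective: alternative
-- what changed: Eliminates the running base-letter state machine: B works in three staged passes (map each element to a step size 1/2/3, take cumulative sums, then map each cumulative sum mod 4 into 'ACGT'), so each output letter is a closed-form function of the prefix sum rather than of the previous letter.
import Mathlib
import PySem

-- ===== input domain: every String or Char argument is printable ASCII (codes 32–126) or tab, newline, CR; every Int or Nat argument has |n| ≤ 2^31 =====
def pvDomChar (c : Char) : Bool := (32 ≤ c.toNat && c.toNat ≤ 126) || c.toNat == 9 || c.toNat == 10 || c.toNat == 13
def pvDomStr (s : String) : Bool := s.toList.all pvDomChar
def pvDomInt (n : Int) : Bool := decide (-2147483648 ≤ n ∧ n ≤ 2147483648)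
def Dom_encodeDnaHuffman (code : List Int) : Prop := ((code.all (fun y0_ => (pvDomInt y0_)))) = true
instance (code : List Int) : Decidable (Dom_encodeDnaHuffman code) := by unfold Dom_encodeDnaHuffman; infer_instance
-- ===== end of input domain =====

-- B replaces A's running base-letter state machine by staged passes: map each element
-- to a step size, take cumulative sums, then index 'ACGT' by each sum mod 4 (objective: alternative).


-- ===== PORT A =====
-- singleElementDna: the Python fall-through 'return None' is unreachable for the
-- 'last' values encodeDnaHuffman ever passes ("A"/"C"/"G"/"T"); ported as "".
def singleElementDna (last : String) (element : Int) : String :=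
  if last == "A" then
    if element == 0 then "C" else if element == 1 then "G" else "T"
  else if last == "C" then
    if element == 0 then "G" else if element == 1 then "T" else "A"
  else if last == "G" then
    if element == 0 then "T" else if element == 1 then "A" else "C"
  else if last == "T" then
    if element == 0 then "A" else if element == 1 then "C" else "G"
  else ""

def encodeDnaHuffmanLoop (last : String) (code : List Int) : List String :=
  match code with
  | [] => []
  | e :: rest =>
    let new := singleElementDna last e
    new :: encodeDnaHuffmanLoop new rest

def encodeDnaHuffman (code : List Int) : List String :=
  encodeDnaHuffmanLoop "A" code

-- ===== PORT B =====
def pvStep (e : Int) : Nat := if e == 0 then 1 else if e == 1 then 2 else 3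

def pvBases (i : Nat) : String :=
  if i = 0 then "A" else if i = 1 then "C" else if i = 2 then "G" else "T"

-- cumulative-sum pass (the explicit for-loop of Source B)
def pvCumsum (total : Nat) (steps : List Nat) : List Nat :=
  match steps with
  | [] => []
  | s :: rest => (total + s) :: pvCumsum (total + s) rest

def encodeDnaHuffman_alt (code : List Int) : List String :=
  (pvCumsum 0 (code.map pvStep)).map (fun t => pvBases (t % 4))

-- ===== PRECONDITION & SPEC =====
def Spec_encodeDnaHuffman (code : List Int) (out : List String) : Prop := out = encodeDnaHuffman_alt code
instance (code : List Int) (out : List String) : Decidable (Spec_encodeDnaHuffman code out) := by unfold Spec_encodeDnaHuffman; infer_instance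

-- ===== CLAIM =====
def Claim_equal_encodeDnaHuffman : Prop := ∀ (code : List Int), Dom_encodeDnaHuffman code → Spec_encodeDnaHuffman code (encodeDnaHuffman code)

-- ===== LEMMAS AND PROOFS =====
theorem step_agree (idx : Nat) (h : idx < 4) (e : Int) :
    singleElementDna (pvBases idx) e = pvBases ((idx + pvStep e) % 4) := by
  interval_cases idx <;> by_cases h0 : e = 0 <;> by_cases h1 : e = 1 <;>
    simp [singleElementDna, pvBases, pvStep, h0, h1]

theorem loops_agree (code : List Int) (t : Nat) :
    encodeDnaHuffmanLoop (pvBases (t % 4)) code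
      = (pvCumsum t (code.map pvStep)).map (fun x => pvBases (x % 4)) := by
  induction code generalizing t with
  | nil => rfl
  | cons e rest ih =>
    have h4 : t % 4 < 4 := Nat.mod_lt _ (by norm_num)
    simp only [List.map_cons, pvCumsum, encodeDnaHuffmanLoop, List.map]
    rw [step_agree (t % 4) h4 e]
    have hm : (t % 4 + pvStep e) % 4 = (t + pvStep e) % 4 := by
      conv_rhs => rw [Nat.add_mod]
      rw [Nat.add_mod, Nat.mod_mod_of_dvd]
      exact dvd_refl 4
    rw [hm]
    exact congrArg _ (ih (t + pvStep e))

-- ===== VERDICT =====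
theorem encodeDnaHuffman_spec : Claim_equal_encodeDnaHuffman := by
  intro code _
  show encodeDnaHuffman code = encodeDnaHuffman_alt code
  rw [encodeDnaHuffman, encodeDnaHuffman_alt]
  simpa using loops_agree code 0
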